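-- pv_equiv track=rewrite | github.com/pr28416/Coding-Competitions | Google Code Jam/2021 Round 1B/1.py | solve
-- ===== SOURCE A (Python) =====
-- def solve(string):
--     lst = [0] * len(string)
--     lst[0] = 1
--     for i in range(1, len(string)):
--         if string[i] > string[i-1]:
--             lst[i] = lst[i-1]+1
--         else:
--             lst[i] = 1
--     return lst
-- ===== SOURCE B (Python) =====
-- def solve(string):
--     n = len(string)
--     out = []
--     s = 0
--     while s < n:
--         e = s + 1
--         while e < n and string[e] > string[e - 1]:
--             e += 1
--         out.extend(range(1, e - s + 1))
--         s = e
--     return out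
-- ===== Notes on version B (the rewrite author's own statement) =====
-- stated objective: alternative
-- what changed: B decomposes the string into maximal strictly-increasing runs and emits 1..len(run) for each run, instead of A's index loop that writes a carry counter into a pre-allocated array.
import Mathlib
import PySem

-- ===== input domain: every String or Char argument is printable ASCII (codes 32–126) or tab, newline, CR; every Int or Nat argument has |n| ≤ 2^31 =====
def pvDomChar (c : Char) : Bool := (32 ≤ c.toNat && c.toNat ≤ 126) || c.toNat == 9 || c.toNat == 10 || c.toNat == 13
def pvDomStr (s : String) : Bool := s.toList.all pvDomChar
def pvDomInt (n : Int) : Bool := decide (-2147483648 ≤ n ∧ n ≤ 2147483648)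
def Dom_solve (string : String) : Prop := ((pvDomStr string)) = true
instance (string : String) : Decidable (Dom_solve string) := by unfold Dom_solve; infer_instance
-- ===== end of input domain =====

-- B decomposes the string into maximal strictly-increasing runs and emits 1..len(run) per run
-- recursively, instead of A's index loop writing a carry counter into a pre-allocated array.

-- ===== PORT A =====
-- lst = [0]*len(string); lst[0] = 1; for i in 1..len-1: lst[i] = lst[i-1]+1 if string[i] > string[i-1] else 1
def solve (string : String) : List Int :=
  let cs := string.toList
  let lst0 : List Int := List.replicate cs.length 0
  let lst1 := PySem.List.pySetD lst0 0 1
  (PySem.List.pyRange 1 cs.length 1).foldl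
    (fun lst i =>
      if PySem.List.pyGetD cs (i - 1) 'a' < PySem.List.pyGetD cs i 'a' then
        PySem.List.pySetD lst i (PySem.List.pyGetD lst (i - 1) 0 + 1)
      else
        PySem.List.pySetD lst i 1) lst1

-- ===== PORT B =====
-- the inner while 'e = s + 1; while e < n and string[e] > string[e-1]: e += 1':
-- pvRunLen cs p counts the extra steps past e = s + 1, scanning the suffix cs with previous char p
def pvRunLen : List Char → Char → Nat
  | [], _ => 0
  | c :: cs, p => if p < c then 1 + pvRunLen cs c else 0

-- the outer while over run starts s, transcribed as recursion on the remaining suffix: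
-- each iteration emits range(1, e-s+1) for the run of length k = e-s and advances past it
def pvSolveRuns : List Char → List Int
  | [] => []
  | c :: cs =>
    let k := 1 + pvRunLen cs c
    PySem.List.pyRange 1 ((k : Int) + 1) 1 ++ pvSolveRuns (cs.drop (k - 1))
termination_by l => l.length
decreasing_by
  simp only [List.length_drop, List.length_cons]
  omega

def solve_alt (string : String) : List Int := pvSolveRuns string.toList

-- ===== PRECONDITION & SPEC =====
-- Pre_ excludes only the empty string, on which Python A raises IndexError (it writes index 0 of an empty list).
def Pre_solve (string : String) : Prop := string ≠ ""
instance (string : String) : Decidable (Pre_solve string) := by unfold Pre_solve; infer_instance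
def pvWitness_solve : String := ("ba")

def Spec_solve (string : String) (out : List Int) : Prop := out = solve_alt string
instance (string : String) (out : List Int) : Decidable (Spec_solve string out) := by unfold Spec_solve; infer_instance

-- ===== CLAIM (what is proved, stated in full; the proofs are below) =====
def Claim_equal_solve : Prop := ∀ (string : String), Dom_solve string → Pre_solve string → Spec_solve string (solve string)

-- ===== LEMMAS AND PROOFS =====

-- reference: pvL cs i = length of the increasing run of cs ending at index i
def pvL (cs : List Char) : Nat → Int
  | 0 => 1
  | i + 1 => if cs.getD i 'a' < cs.getD (i + 1) 'a' then pvL cs i + 1 else 1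

theorem pvRunLen_le (cs : List Char) (p : Char) : pvRunLen cs p ≤ cs.length := by
  induction cs generalizing p with
  | nil => simp [pvRunLen]
  | cons c cs ih =>
    have := ih c
    simp only [pvRunLen, List.length_cons]
    split
    · omega
    · omega

-- within the run: each adjacent pair of p::cs increases
theorem pvRunLen_incr (cs : List Char) (p : Char) (j : Nat) (hj : j < pvRunLen cs p) :
    (p :: cs).getD j 'a' < cs.getD j 'a' := by
  induction cs generalizing p j with
  | nil => simp [pvRunLen] at hj
  | cons c cs ih =>
    simp only [pvRunLen] at hj
    split at hj
    · cases j with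
      | zero => simpa
      | succ j => exact ih c j (by omega)
    · omega

-- at the end of the run (if not at end of list): no increase
theorem pvRunLen_break (cs : List Char) (p : Char) (h : pvRunLen cs p < cs.length) :
    ¬ ((p :: cs).getD (pvRunLen cs p) 'a' < cs.getD (pvRunLen cs p) 'a') := by
  induction cs generalizing p with
  | nil => simp [pvRunLen] at h
  | cons c cs ih =>
    by_cases hpc : p < c
    · simp only [pvRunLen, if_pos hpc, List.length_cons] at h ⊢
      rw [Nat.add_comm]
      simpa only [List.getD_cons_succ] using ih c (by omega)
    · simp only [pvRunLen, if_neg hpc, List.getD_cons_zero]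
      simpa using hpc

-- inside a run the run length ending at j is j+1
theorem pvL_run (c : Char) (cs : List Char) (j : Nat) (hj : j ≤ pvRunLen cs c) :
    pvL (c :: cs) j = (j : Int) + 1 := by
  induction j with
  | zero => simp [pvL]
  | succ j ih =>
    have hlt : (c :: cs).getD j 'a' < cs.getD j 'a' := pvRunLen_incr cs c j (by omega)
    simp only [pvL, List.getD_cons_succ, if_pos hlt, ih (by omega)]
    push_cast; ring

-- past a break at k, pvL restarts: it agrees with pvL of the dropped suffix
theorem pvL_drop (xs : List Char) (k : Nat) (hk1 : 1 ≤ k)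
    (hbreak : ¬ xs.getD (k - 1) 'a' < xs.getD k 'a') :
    ∀ m, pvL xs (k + m) = pvL (xs.drop k) m := by
  intro m
  induction m with
  | zero =>
    obtain ⟨j, rfl⟩ : ∃ j, k = j + 1 := ⟨k - 1, by omega⟩
    simp only [pvL]
    rw [if_neg (by simpa using hbreak)]
  | succ m ih =>
    have hg : ∀ i, (xs.drop k).getD i 'a' = xs.getD (k + i) 'a' := by
      intro i
      simp [List.getD_eq_getElem?_getD, List.getElem?_drop]
    show pvL xs (k + m + 1) = _
    rw [show k + m + 1 = (k + m) + 1 from rfl]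
    simp only [pvL, hg, ih, Nat.add_assoc]

-- B's run recursion produces pvL at every index
theorem pvSolveRuns_eq (cs : List Char) :
    pvSolveRuns cs = (List.range cs.length).map (pvL cs) := by
  induction cs using pvSolveRuns.induct with
  | case1 => simp [pvSolveRuns]
  | case2 c cs k ih =>
    have hr : k = 1 + pvRunLen cs c := rfl
    have hkle : k ≤ (c :: cs).length := by
      have := pvRunLen_le cs c
      simp only [List.length_cons]; omega
    have hdropeq : cs.drop (k - 1) = (c :: cs).drop k := by
      rw [hr, show 1 + pvRunLen cs c - 1 = pvRunLen cs c by omega, Nat.add_comm,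
        List.drop_succ_cons]
    have hlen : (cs.drop (k - 1)).length = (c :: cs).length - k := by
      simp only [List.length_drop, List.length_cons]; omega
    -- split the index range at the end of the first run
    have hsplit : (List.range (c :: cs).length).map (pvL (c :: cs))
        = (List.range k).map (pvL (c :: cs))
          ++ (List.range ((c :: cs).length - k)).map (fun m => pvL (c :: cs) (k + m)) := by
      rw [show (c :: cs).length = k + ((c :: cs).length - k) by omega, List.range_add]
      simp [Function.comp_def]
    rw [pvSolveRuns]
    simp only [← hr]
    rw [hsplit]
    congr 1
    · -- first run chunk is 1..k
      rw [PySem.List.pyRange_one]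
      have : ((k : Int) + 1 - 1).toNat = k := by omega
      rw [this]
      apply List.map_congr_left
      intro j hj
      rw [List.mem_range] at hj
      rw [pvL_run c cs j (by omega)]
      omega
    · -- tail chunk is the recursion on the dropped suffix
      rw [ih, hlen, hdropeq]
      apply List.map_congr_left
      intro m hm
      rw [List.mem_range] at hm
      have hkn : k < (c :: cs).length := by omega
      have hbreak : ¬ ((c :: cs).getD (k - 1) 'a' < (c :: cs).getD k 'a') := by
        have hb := pvRunLen_break cs c (by simp only [List.length_cons] at hkn; omega)
        rw [hr, show 1 + pvRunLen cs c - 1 = pvRunLen cs c by omega,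
          show 1 + pvRunLen cs c = pvRunLen cs c + 1 by omega, List.getD_cons_succ]
        exact hb
      exact (pvL_drop (c :: cs) k (by omega) hbreak m).symm

-- A's loop invariant: after processing indices 1..m, lst holds pvL on the prefix and 0 beyond
theorem pvA_inv (cs : List Char) (h0 : cs ≠ []) (m : Nat) (hm : m ≤ cs.length - 1) :
    (PySem.List.pyRange 1 (1 + (m : Int)) 1).foldl
      (fun lst i =>
        if PySem.List.pyGetD cs (i - 1) 'a' < PySem.List.pyGetD cs i 'a' then
          PySem.List.pySetD lst i (PySem.List.pyGetD lst (i - 1) 0 + 1)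
        else
          PySem.List.pySetD lst i 1)
      (PySem.List.pySetD (List.replicate cs.length (0 : Int)) 0 1)
    = (List.range (1 + m)).map (pvL cs) ++ List.replicate (cs.length - 1 - m) 0 := by
  have hn : 1 ≤ cs.length := by
    cases cs with
    | nil => exact absurd rfl h0
    | cons a l => simp
  induction m with
  | zero =>
    rw [show (1 + ((0:Nat) : Int)) = 1 by norm_num, PySem.List.pyRange_one_eq_nil (le_refl 1)]
    obtain ⟨c, cs', rfl⟩ : ∃ c cs', cs = c :: cs' := by
      cases cs with
      | nil => exact absurd rfl h0
      | cons a l => exact ⟨a, l, rfl⟩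
    simp [PySem.List.pySetD_of_nonneg, pvL, List.range_succ, List.replicate_succ]
  | succ m ihm =>
    have ih := ihm (by omega)
    have hcast : (1 : Int) + ((m + 1 : Nat) : Int) = (1 + (m : Int)) + 1 := by push_cast; ring
    rw [hcast, PySem.List.pyRange_one_succ_right (by omega), List.foldl_append, ih]
    simp only [List.foldl_cons, List.foldl_nil]
    set A := (List.range (1 + m)).map (pvL cs) with hA
    have hAlen : A.length = 1 + m := by simp [hA]
    have hZ : List.replicate (cs.length - 1 - m) (0 : Int)
        = 0 :: List.replicate (cs.length - 1 - (m + 1)) 0 := by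
      rw [show cs.length - 1 - m = (cs.length - 1 - (m + 1)) + 1 by omega, List.replicate_succ]
    -- the index being written
    have hi : (1 : Int) + (m : Int) = ((m + 1 : Nat) : Int) := by omega
    have hi1 : (1 : Int) + (m : Int) - 1 = ((m : Nat) : Int) := by omega
    rw [hi1, hi]
    -- the two list reads and the write
    have hgcs : ∀ (j : Nat), PySem.List.pyGetD cs ((j : Nat) : Int) 'a' = cs.getD j 'a' := by
      intro j; rw [PySem.List.pyGetD_natCast]
    have hglst : PySem.List.pyGetD (A ++ List.replicate (cs.length - 1 - m) 0) ((m : Nat) : Int) 0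
        = pvL cs m := by
      rw [PySem.List.pyGetD_natCast]
      rw [List.getD_eq_getElem?_getD, List.getElem?_append_left (by omega)]
      simp [hA]
    have hset : ∀ (v : Int),
        PySem.List.pySetD (A ++ List.replicate (cs.length - 1 - m) 0) (((m + 1 : Nat) : Int)) v
        = A ++ v :: List.replicate (cs.length - 1 - (m + 1)) 0 := by
      intro v
      rw [PySem.List.pySetD_natCast, hZ]
      rw [show m + 1 = A.length + 0 by omega, List.set_append_right _ _ (by omega)]
      simp
    rw [hgcs, hgcs, hglst]
    have hrange : List.range (1 + (m + 1)) = List.range (1 + m) ++ [m + 1] := by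
      rw [show 1 + (m + 1) = (1 + m) + 1 by omega, List.range_succ, Nat.add_comm 1 m]
    rw [hrange, List.map_append, List.map_singleton]
    by_cases hc : cs.getD m 'a' < cs.getD (m + 1) 'a'
    · rw [if_pos hc, hset]
      have h2 : pvL cs (m + 1) = pvL cs m + 1 := by rw [pvL, if_pos hc]
      simp [h2, hA]
    · rw [if_neg hc, hset]
      have h2 : pvL cs (m + 1) = 1 := by rw [pvL, if_neg hc]
      simp [h2, hA]

-- A's port produces pvL at every index
theorem pvSolve_eq (s : String) (h : s.toList ≠ []) :
    solve s = (List.range s.toList.length).map (pvL s.toList) := by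
  have hn : 1 ≤ s.toList.length := by
    cases hh : s.toList with
    | nil => exact absurd hh h
    | cons a l => simp
  have key := pvA_inv s.toList h (s.toList.length - 1) (le_refl _)
  have hc : (1 : Int) + ((s.toList.length - 1 : Nat) : Int) = (s.toList.length : Int) := by
    omega
  rw [hc] at key
  unfold solve
  rw [key, show 1 + (s.toList.length - 1) = s.toList.length by omega]
  simp

-- ===== VERDICT (by name: the statement is the Claim_ definition above) =====
theorem solve_spec : Claim_equal_solve := by
  intro s _ hpre
  unfold Spec_solve solve_alt
  have h : s.toList ≠ [] := by
    intro h
    exact hpre (String.toList_eq_nil_iff.mp h)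
  rw [pvSolve_eq s h, pvSolveRuns_eq]
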